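-- pv_equiv track=rewrite | github.com/tzookb/programming-challenges | fb/hops.py | getSecondsRequired
-- ===== SOURCE A (Python) =====
-- from typing import List
--
-- def getSecondsRequired(N: int, F: int, P: List[int]) -> int:
--     P.sort()
--     hops = 0
--     for i in range(1, F):
--         prev = P[i - 1]
--         cur = P[i]
--         diff = cur - prev
--         if diff > 1:
--             hops += diff - 1
--
--     hops += N - 1 - P[-1]
--     hops += F
--
--     return hops
-- ===== SOURCE B (Python) =====
-- from typing import List
--
-- def getSecondsRequired(N: int, F: int, P: List[int]) -> int:
--     # Closed form: the adjacent-gap sum over the F smallest pads telescopes to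
--     # (F-th smallest) - min(P) - (number of distinct values among the F smallest - 1).
--     base = N - 1 - max(P) + F
--     if F <= 0:
--         return base
--     prefix = sorted(P)[:F]
--     return base + prefix[-1] - min(P) - len(set(prefix)) + 1
-- ===== Notes on version B (the rewrite author's own statement) =====
-- stated objective: alternative
-- what changed: Replaces A's adjacent-gap loop over the sorted list with a closed form: the gap sum telescopes to prefix[-1] - min(P) - (len(set(prefix)) - 1) for prefix = sorted(P)[:F], computed directly from min, max, the F-th smallest and a distinct count.
import Mathlib
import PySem

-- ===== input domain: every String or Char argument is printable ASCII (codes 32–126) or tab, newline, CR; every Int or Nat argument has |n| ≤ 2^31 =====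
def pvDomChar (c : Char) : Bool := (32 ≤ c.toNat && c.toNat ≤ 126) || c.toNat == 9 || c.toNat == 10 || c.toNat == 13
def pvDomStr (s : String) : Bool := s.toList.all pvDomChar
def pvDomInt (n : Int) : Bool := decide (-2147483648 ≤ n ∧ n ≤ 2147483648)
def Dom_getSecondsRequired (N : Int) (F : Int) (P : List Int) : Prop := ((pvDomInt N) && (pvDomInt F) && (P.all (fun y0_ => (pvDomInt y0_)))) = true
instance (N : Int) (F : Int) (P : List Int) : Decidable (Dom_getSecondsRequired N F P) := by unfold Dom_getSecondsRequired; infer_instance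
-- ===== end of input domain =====

-- B replaces A's adjacent-gap loop by a closed form (the gap sum telescopes to
-- prefix[-1] - min(P) - (#distinct in sorted(P)[:F] - 1)); A sorts P in place (a side
-- effect B does not have) — the equivalence proved here is about the return value only.

-- ===== PORT A =====
def getSecondsRequired (N : Int) (F : Int) (P : List Int) : Int :=
  let s := PySem.List.sorted P (fun x => x)        -- P.sort()
  let hops :=
    (PySem.List.pyRange 1 F 1).foldl (fun hops i =>
      let prev := PySem.List.pyGetD s (i - 1) 0    -- P[i-1] (in range under Pre_)
      let cur := PySem.List.pyGetD s i 0           -- P[i]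
      let diff := cur - prev
      if diff > 1 then hops + (diff - 1) else hops) 0
  let hops := hops + (N - 1 - PySem.List.pyGetD s (-1) 0)   -- P[-1]
  hops + F

-- ===== PORT B =====
def getSecondsRequired_alt (N : Int) (F : Int) (P : List Int) : Int :=
  let base := N - 1 - (PySem.List.max? P (fun x => x)).getD 0 + F   -- max(P) (P ≠ [] under Pre_)
  if F ≤ 0 then base
  else
    let pre := PySem.List.slice (PySem.List.sorted P (fun x => x)) none (some F)  -- sorted(P)[:F]
    base + PySem.List.pyGetD pre (-1) 0 - (PySem.List.min? P (fun x => x)).getD 0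
      - ((PySem.Set.ofList pre).length : Int) + 1   -- len(set(prefix))

-- ===== PRECONDITION & SPEC =====
-- Exactly the inputs on which A returns: on P = [] A raises IndexError at P[-1], and for
-- F > len(P) it raises IndexError at P[F-1] inside the loop.
def Pre_getSecondsRequired (N : Int) (F : Int) (P : List Int) : Prop :=
  P ≠ [] ∧ F ≤ (P.length : Int)
instance (N : Int) (F : Int) (P : List Int) : Decidable (Pre_getSecondsRequired N F P) := by
  unfold Pre_getSecondsRequired; infer_instance

def pvWitness_getSecondsRequired : Int × Int × List Int := (10, 3, [5, 1, 3])

def Spec_getSecondsRequired (N : Int) (F : Int) (P : List Int) (out : Int) : Prop := out = getSecondsRequired_alt N F P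
instance (N : Int) (F : Int) (P : List Int) (out : Int) : Decidable (Spec_getSecondsRequired N F P out) := by unfold Spec_getSecondsRequired; infer_instance

-- ===== CLAIM (what is proved, stated in full; the proofs are below) =====
def Claim_equal_getSecondsRequired : Prop := ∀ (N : Int) (F : Int) (P : List Int), Dom_getSecondsRequired N F P → Pre_getSecondsRequired N F P → Spec_getSecondsRequired N F P (getSecondsRequired N F P)

-- ===== LEMMAS AND PROOFS =====

-- A's loop body, with the sorted list fixed.
def pvStep (s : List Int) (hops i : Int) : Int :=
  let prev := PySem.List.pyGetD s (i - 1) 0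
  let cur := PySem.List.pyGetD s i 0
  let diff := cur - prev
  if diff > 1 then hops + (diff - 1) else hops

-- In a non-decreasing list every element is at most the last one.
lemma pvLe_getLastD (s : List Int) (h : s.Pairwise (· ≤ ·)) (hs : s ≠ []) :
    ∀ y ∈ s, y ≤ s.getLastD 0 := by
  intro y hy
  obtain ⟨i, hi, rfl⟩ := List.mem_iff_getElem.mp hy
  have hgl : s.getLastD 0 = s[s.length - 1]'(by omega) := by
    simp [List.getLastD_eq_getLast?, List.getLast?_eq_some_getLast hs, List.getLast_eq_getElem]
  rw [hgl]
  rcases Nat.lt_or_ge i (s.length - 1) with hlt | hge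
  · exact List.pairwise_iff_getElem.mp h i (s.length - 1) hi (by omega) hlt
  · have : i = s.length - 1 := by omega
    subst this
    exact le_refl _

-- the last element of a nonempty list, as getLastD, is a member
lemma pvGetLastD_mem (s : List Int) (hs : s ≠ []) : s.getLastD 0 ∈ s := by
  simp [List.getLastD_eq_getLast?, List.getLast?_eq_some_getLast hs]

-- Telescoping: on a non-decreasing list the gap loop sums to
-- last - head - (number of distinct values - 1).
lemma pvTele (s : List Int) (h : s.Pairwise (· ≤ ·)) (hs : s ≠ []) :
    (PySem.List.pyRange 1 (s.length : Int) 1).foldl (pvStep s) 0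
      = s.getLastD 0 - s.headI - (((PySem.Set.ofList s).length : Int) - 1) := by
  induction s using List.reverseRecOn with
  | nil => exact absurd rfl hs
  | append_singleton t b ih =>
    rcases eq_or_ne t [] with rfl | ht
    · simp [PySem.List.pyRange_one_eq_nil, PySem.Set.ofList]
    · have hlen : 1 ≤ (t.length : Int) := by
        have := List.length_pos_iff.mpr ht; omega
      have hsplit : PySem.List.pyRange 1 ((t ++ [b]).length : Int) 1
          = PySem.List.pyRange 1 (t.length : Int) 1 ++ [(t.length : Int)] := by
        have hl : ((t ++ [b]).length : Int) = (t.length : Int) + 1 := by simp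
        rw [hl, PySem.List.pyRange_one_succ_right (by omega)]
      have hpair : t.Pairwise (· ≤ ·) := (List.pairwise_append.mp h).1
      have hlt : ∀ x ∈ t, x ≤ b := by
        intro x hx
        exact (List.pairwise_append.mp h).2.2 x hx b (List.mem_singleton_self b)
      have hcongr : (PySem.List.pyRange 1 (t.length : Int) 1).foldl (pvStep (t ++ [b])) 0
          = (PySem.List.pyRange 1 (t.length : Int) 1).foldl (pvStep t) 0 := by
        refine PySem.List.foldl_congr_mem _ _ _ _ ?_
        intro acc i hi
        have hi' := PySem.List.mem_pyRange_one.mp hi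
        have h1 : PySem.List.pyGetD (t ++ [b]) (i - 1) 0 = PySem.List.pyGetD t (i - 1) 0 := by
          rw [PySem.List.pyGetD_eq_getElem (t ++ [b]) 0 (by omega) (by simp only [List.length_append, List.length_cons, List.length_nil]; omega),
              PySem.List.pyGetD_eq_getElem t 0 (by omega) (by omega)]
          exact List.getElem_append_left (by omega)
        have h2 : PySem.List.pyGetD (t ++ [b]) i 0 = PySem.List.pyGetD t i 0 := by
          rw [PySem.List.pyGetD_eq_getElem (t ++ [b]) 0 (by omega) (by simp only [List.length_append, List.length_cons, List.length_nil]; omega),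
              PySem.List.pyGetD_eq_getElem t 0 (by omega) (by omega)]
          exact List.getElem_append_left (by omega)
        simp only [pvStep, h1, h2]
      have hgl : t.getLastD 0 = t.getLast ht := by
        simp [List.getLastD_eq_getLast?, List.getLast?_eq_some_getLast ht]
      have hlast : PySem.List.pyGetD (t ++ [b]) ((t.length : Int) - 1) 0 = t.getLastD 0 := by
        rw [PySem.List.pyGetD_eq_getElem (t ++ [b]) 0 (by omega) (by simp only [List.length_append, List.length_cons, List.length_nil]; omega)]
        rw [List.getElem_append_left (by omega : ((t.length : Int) - 1).toNat < t.length)]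
        rw [hgl, List.getLast_eq_getElem]
        congr 1
        omega
      have hb : PySem.List.pyGetD (t ++ [b]) ((t.length : Int)) 0 = b := by
        rw [PySem.List.pyGetD_eq_getElem (t ++ [b]) 0 (by omega) (by simp)]
        simp
      have hge : t.getLastD 0 ≤ b := hlt _ (pvGetLastD_mem t ht)
      have hmem_le : b ∈ t → b ≤ t.getLastD 0 := pvLe_getLastD t hpair ht b
      have hheadI : (t ++ [b]).headI = t.headI := by
        cases t with
        | nil => exact absurd rfl ht
        | cons x t' => rfl
      have hofl : PySem.Set.ofList (t ++ [b])
          = if b ∈ t then PySem.Set.ofList t else PySem.Set.ofList t ++ [b] := by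
        rw [PySem.Set.ofList_eq_foldl, List.foldl_append, ← PySem.Set.ofList_eq_foldl]
        show PySem.Set.add (PySem.Set.ofList t) b = _
        simp [PySem.Set.add, PySem.Set.contains, PySem.Set.mem_ofList]
      rw [hsplit, List.foldl_append, hcongr, ih hpair ht]
      simp only [List.foldl_cons, List.foldl_nil, pvStep, hlast, hb]
      rw [List.getLastD_concat, hheadI, hofl]
      by_cases hbt : b ∈ t
      · have hbeq : b = t.getLastD 0 := le_antisymm (hmem_le hbt) hge
        simp only [if_pos hbt]
        split_ifs with hcase <;> omega
      · have hbne : b ≠ t.getLastD 0 := fun hEq => hbt (hEq ▸ pvGetLastD_mem t ht)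
        simp only [if_neg hbt, List.length_append, List.length_cons, List.length_nil]
        split_ifs with hcase <;> push_cast <;> omega

-- min(P) equals the head of sorted(P).
lemma pvSorted_head_eq_min (P : List Int) (hP : P ≠ []) :
    (PySem.List.min? P (fun x => x)).getD 0
      = (PySem.List.sorted P (fun x => x)).headI := by
  obtain ⟨m, hm⟩ : ∃ m, PySem.List.min? P (fun x => x) = some m := by
    cases hmin : PySem.List.min? P (fun x => x) with
    | none => exact absurd ((PySem.List.min?_eq_none_iff P (fun x => x)).mp hmin) hP
    | some m => exact ⟨m, rfl⟩
  have hmem : m ∈ P := PySem.List.min?_mem hm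
  have hmin : ∀ y ∈ P, m ≤ y := PySem.List.min?_isMin hm
  obtain ⟨a, t, hst⟩ : ∃ a t, PySem.List.sorted P (fun x => x) = a :: t := by
    cases hcase : PySem.List.sorted P (fun x => x) with
    | nil => exact absurd ((PySem.List.sorted_eq_nil_iff P (fun x => x) false).mp hcase) hP
    | cons a t => exact ⟨a, t, rfl⟩
  have hhead : ∀ y ∈ P, a ≤ y := PySem.List.key_head_sorted_le P (fun x => x) hst
  have hamem : a ∈ P := by
    have : a ∈ PySem.List.sorted P (fun x => x) := by rw [hst]; exact List.mem_cons_self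
    exact (PySem.List.mem_sorted P (fun x => x) false a).mp this
  rw [hm, hst]
  exact le_antisymm (hmin a hamem) (hhead m hmem)

-- max(P) equals the last element of sorted(P).
lemma pvSorted_last_eq_max (P : List Int) (hP : P ≠ []) :
    (PySem.List.max? P (fun x => x)).getD 0
      = (PySem.List.sorted P (fun x => x)).getLastD 0 := by
  obtain ⟨m, hm⟩ : ∃ m, PySem.List.max? P (fun x => x) = some m := by
    cases hmax : PySem.List.max? P (fun x => x) with
    | none => exact absurd ((PySem.List.max?_eq_none_iff P (fun x => x)).mp hmax) hP
    | some m => exact ⟨m, rfl⟩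
  have hmem : m ∈ P := PySem.List.max?_mem hm
  have hmax : ∀ y ∈ P, y ≤ m := PySem.List.max?_isMax hm
  have hs : PySem.List.sorted P (fun x => x) ≠ [] := fun hnil =>
    hP ((PySem.List.sorted_eq_nil_iff P (fun x => x) false).mp hnil)
  have hpair : (PySem.List.sorted P (fun x => x)).Pairwise (· ≤ ·) :=
    PySem.List.sorted_pairwise P (fun x => x)
  have h1 : (PySem.List.sorted P (fun x => x)).getLastD 0 ≤ m :=
    hmax _ ((PySem.List.mem_sorted P (fun x => x) false _).mp (pvGetLastD_mem _ hs))
  have h2 : m ≤ (PySem.List.sorted P (fun x => x)).getLastD 0 :=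
    pvLe_getLastD _ hpair hs m ((PySem.List.mem_sorted P (fun x => x) false m).mpr hmem)
  rw [hm]
  exact le_antisymm h2 h1

-- ===== VERDICT (by name: the statement is the Claim_ definition above) =====
theorem getSecondsRequired_spec : Claim_equal_getSecondsRequired := by
  intro N F P _ hpre
  obtain ⟨hP, hF⟩ := hpre
  unfold Spec_getSecondsRequired getSecondsRequired getSecondsRequired_alt
  show ((PySem.List.pyRange 1 F 1).foldl (pvStep (PySem.List.sorted P (fun x => x))) 0
        + (N - 1 - PySem.List.pyGetD (PySem.List.sorted P (fun x => x)) (-1) 0) + F)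
      = (if F ≤ 0 then N - 1 - (PySem.List.max? P (fun x => x)).getD 0 + F
         else N - 1 - (PySem.List.max? P (fun x => x)).getD 0 + F
           + PySem.List.pyGetD (PySem.List.slice (PySem.List.sorted P (fun x => x)) none (some F)) (-1) 0
           - (PySem.List.min? P (fun x => x)).getD 0
           - ((PySem.Set.ofList (PySem.List.slice (PySem.List.sorted P (fun x => x)) none (some F))).length : Int) + 1)
  have hs : PySem.List.sorted P (fun x => x) ≠ [] := fun hnil =>
    hP ((PySem.List.sorted_eq_nil_iff P (fun x => x) false).mp hnil)
  set s := PySem.List.sorted P (fun x => x) with hsdef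
  have hperm := PySem.List.sorted_perm P (fun x => x) false
  have hlen : s.length = P.length := hperm.length_eq
  have hpair : s.Pairwise (· ≤ ·) := PySem.List.sorted_pairwise P (fun x => x)
  have hmax : (PySem.List.max? P (fun x => x)).getD 0 = s.getLastD 0 :=
    pvSorted_last_eq_max P hP
  have hlastD : PySem.List.pyGetD s (-1) 0 = s.getLastD 0 := by
    rw [PySem.List.pyGetD_neg_one s 0 hs]
    simp [List.getLastD_eq_getLast?, List.getLast?_eq_some_getLast hs]
  by_cases hF0 : F ≤ 0
  · -- loop body never runs: range(1, F) is empty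
    rw [if_pos hF0, PySem.List.pyRange_one_eq_nil (by omega)]
    simp only [List.foldl_nil, hlastD, hmax]
    ring
  · rw [if_neg hF0]
    have hF1 : 1 ≤ F := by omega
    set pre := s.take F.toNat with hpredef
    have hprelen : pre.length = F.toNat := by
      simp [hpredef, List.length_take]
      omega
    have hpre_ne : pre ≠ [] := by
      intro hnil
      have := congrArg List.length hnil
      rw [hprelen] at this
      simp at this
      omega
    have hslice : PySem.List.slice s none (some F) = pre := by
      have hFcast : F = ((F.toNat : Nat) : Int) := by omega
      rw [hFcast, PySem.List.slice_to_natCast]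
    have hprepair : pre.Pairwise (· ≤ ·) := hpair.sublist (List.take_sublist _ _)
    -- A's loop over range(1, F) reads only the first F entries of s
    have hcongr : (PySem.List.pyRange 1 F 1).foldl (pvStep s) 0
        = (PySem.List.pyRange 1 F 1).foldl (pvStep pre) 0 := by
      refine PySem.List.foldl_congr_mem _ _ _ _ ?_
      intro acc i hi
      have hi' := PySem.List.mem_pyRange_one.mp hi
      have hiF : i < (s.length : Int) := by omega
      have h1 : PySem.List.pyGetD s (i - 1) 0 = PySem.List.pyGetD pre (i - 1) 0 := by
        rw [PySem.List.pyGetD_eq_getElem s 0 (by omega) (by omega),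
            PySem.List.pyGetD_eq_getElem pre 0 (by omega) (by rw [hprelen]; omega)]
        exact (List.getElem_take).symm
      have h2 : PySem.List.pyGetD s i 0 = PySem.List.pyGetD pre i 0 := by
        rw [PySem.List.pyGetD_eq_getElem s 0 (by omega) (by omega),
            PySem.List.pyGetD_eq_getElem pre 0 (by omega) (by rw [hprelen]; omega)]
        exact (List.getElem_take).symm
      simp only [pvStep, h1, h2]
    have hrange : PySem.List.pyRange 1 F 1 = PySem.List.pyRange 1 (pre.length : Int) 1 := by
      rw [hprelen]
      congr 1
      omega
    have htele := pvTele pre hprepair hpre_ne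
    have hprelast : PySem.List.pyGetD pre (-1) 0 = pre.getLastD 0 := by
      rw [PySem.List.pyGetD_neg_one pre 0 hpre_ne]
      simp [List.getLastD_eq_getLast?, List.getLast?_eq_some_getLast hpre_ne]
    have hprehead : pre.headI = s.headI := by
      cases hcase : s with
      | nil => exact absurd hcase hs
      | cons a t =>
        obtain ⟨k, hk⟩ : ∃ k, F.toNat = k + 1 := ⟨F.toNat - 1, by omega⟩
        rw [hpredef, hcase, hk, List.take_succ_cons]
        rfl
    have hmin : (PySem.List.min? P (fun x => x)).getD 0 = pre.headI := by
      rw [hprehead]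
      exact pvSorted_head_eq_min P hP
    have hfold : (PySem.List.pyRange 1 F 1).foldl (pvStep s) 0
        = pre.getLastD 0 - pre.headI - (((PySem.Set.ofList pre).length : Int) - 1) := by
      rw [hcongr, hrange, htele]
    rw [hslice, hfold, hprelast, hmin, hmax, hlastD]
    ring
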